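-- pv_equiv track=rewrite | github.com/mauropappaterra/Google-Code-Jam | 2017/BathroomStalls.py | return_maximal_max
-- ===== SOURCE A (Python) =====
-- def return_maximal_max (first_selection, maximum): # for second selection
--     """Takes a list of all indexes from the first selection, returns a list of all indexes where maximum is maximal"""
--     maximal = []
--     second_selection = -1
--
--     for index in first_selection:
--         maximal.append(maximum[index]) # return the max (Sl,Sr) value for the given indexes only
--
--     maximal_value = max (maximal) # find the maximal among max (Sl,Sr)
--
--     for index in first_selection:
--         if (maximum[index] == maximal_value):
--             second_selection = index # retrieve the index from the first selection list,
--             break # only the leftmost is important, break after first is found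
--
--     # FOR TESTING PURPOSES
--     #print ("Second selection results " + str(second_selection))
--     return second_selection
-- ===== SOURCE B (Python) =====
-- def return_maximal_max(first_selection, maximum):
--     """Takes a list of all indexes from the first selection, returns a list of all indexes where maximum is maximal"""
--     return max(first_selection, key=lambda i: maximum[i])
-- ===== Notes on version B (the rewrite author's own statement) =====
-- stated objective: idiomatic
-- what changed: Replaces A's three passes (materialize the value list, max() over it, re-scan for the first matching index) with a single built-in argmax: max(first_selection, key=lambda i: maximum[i]), which keeps only the running best index in one pass; Python's max returns the first element attaining the maximal key, matching A's leftmost tie-break.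
import Mathlib
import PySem

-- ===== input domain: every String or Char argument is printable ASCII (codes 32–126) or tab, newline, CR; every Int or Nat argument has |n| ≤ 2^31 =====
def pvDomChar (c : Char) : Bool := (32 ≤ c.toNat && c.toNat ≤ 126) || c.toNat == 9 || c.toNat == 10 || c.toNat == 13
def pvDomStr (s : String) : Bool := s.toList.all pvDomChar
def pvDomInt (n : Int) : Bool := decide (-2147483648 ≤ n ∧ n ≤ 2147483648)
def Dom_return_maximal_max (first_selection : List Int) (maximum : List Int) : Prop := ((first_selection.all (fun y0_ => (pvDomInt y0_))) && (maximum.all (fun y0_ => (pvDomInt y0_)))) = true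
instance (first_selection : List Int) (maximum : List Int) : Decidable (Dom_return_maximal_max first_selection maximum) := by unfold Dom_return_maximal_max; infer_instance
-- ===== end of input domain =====

-- B replaces A's three passes (build the value list, max over it, re-scan for the first matching index)
-- with a single argmax pass (Python's max with a key, which returns the first maximal element).


-- ===== PORT A =====
-- the second loop of A: scan for the first index whose value equals maximal_value,
-- `break` on the first hit; second_selection stays -1 when nothing matches
def rmmScan (first_selection : List Int) (maximum : List Int) (maximal_value : Int) : Int :=
  match first_selection with
  | [] => -1
  | index :: rest =>
      if PySem.List.pyGetD maximum index 0 = maximal_value then index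
      else rmmScan rest maximum maximal_value

def return_maximal_max (first_selection : List Int) (maximum : List Int) : Int :=
  let maximal := first_selection.foldl (fun acc index => acc ++ [PySem.List.pyGetD maximum index 0]) []
  let maximal_value := (PySem.List.max? maximal (fun y => y)).getD 0
  rmmScan first_selection maximum maximal_value

-- ===== PORT B =====
def return_maximal_max_alt (first_selection : List Int) (maximum : List Int) : Int :=
  (PySem.List.max? first_selection (fun i => PySem.List.pyGetD maximum i 0)).getD 0

-- ===== PRECONDITION & SPEC =====
-- Pre_ excludes exactly the inputs where A raises: an empty first_selection (max([]) is a
-- ValueError) and any index outside Python's valid range for maximum (IndexError).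
def Pre_return_maximal_max (first_selection : List Int) (maximum : List Int) : Prop :=
  first_selection ≠ [] ∧
  ∀ i ∈ first_selection, -(maximum.length : Int) ≤ i ∧ i < (maximum.length : Int)
instance (first_selection : List Int) (maximum : List Int) : Decidable (Pre_return_maximal_max first_selection maximum) := by unfold Pre_return_maximal_max; infer_instance

def pvWitness_return_maximal_max : List Int × List Int := ([1, 0, -2], [5, 7, 7])

def Spec_return_maximal_max (first_selection : List Int) (maximum : List Int) (out : Int) : Prop := out = return_maximal_max_alt first_selection maximum
instance (first_selection : List Int) (maximum : List Int) (out : Int) : Decidable (Spec_return_maximal_max first_selection maximum out) := by unfold Spec_return_maximal_max; infer_instance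

-- ===== CLAIM (what is proved, stated in full; the proofs are below) =====
def Claim_equal_return_maximal_max : Prop := ∀ (first_selection : List Int) (maximum : List Int), Dom_return_maximal_max first_selection maximum → Pre_return_maximal_max first_selection maximum → Spec_return_maximal_max first_selection maximum (return_maximal_max first_selection maximum)

-- ===== LEMMAS AND PROOFS =====

-- the pick fold's value: its key bounds the seed's key, equals the running max of the keys,
-- and the first-match scan at that max returns exactly the picked element
theorem pick_props (maximum : List Int) (t : List Int) (x : Int) :
    PySem.List.pyGetD maximum x 0
      ≤ PySem.List.pyGetD maximum
          (t.foldl (fun b y => if PySem.List.pyGetD maximum b 0 < PySem.List.pyGetD maximum y 0 then y else b) x) 0 ∧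
    PySem.List.pyGetD maximum
        (t.foldl (fun b y => if PySem.List.pyGetD maximum b 0 < PySem.List.pyGetD maximum y 0 then y else b) x) 0
      = (t.map (fun i => PySem.List.pyGetD maximum i 0)).foldl max (PySem.List.pyGetD maximum x 0) ∧
    rmmScan (x :: t) maximum
        (PySem.List.pyGetD maximum
          (t.foldl (fun b y => if PySem.List.pyGetD maximum b 0 < PySem.List.pyGetD maximum y 0 then y else b) x) 0)
      = t.foldl (fun b y => if PySem.List.pyGetD maximum b 0 < PySem.List.pyGetD maximum y 0 then y else b) x := by
  induction t generalizing x with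
  | nil => simp [rmmScan]
  | cons y t ih =>
      simp only [List.foldl_cons, List.map_cons]
      by_cases h : PySem.List.pyGetD maximum x 0 < PySem.List.pyGetD maximum y 0
      · simp only [if_pos h]
        obtain ⟨h1, h2, h3⟩ := ih y
        refine ⟨le_of_lt (lt_of_lt_of_le h h1), ?_, ?_⟩
        · rw [h2]; congr 1; omega
        · rw [rmmScan, if_neg (by intro hx; omega)]
          exact h3
      · simp only [if_neg h]
        obtain ⟨h1, h2, h3⟩ := ih x
        refine ⟨h1, ?_, ?_⟩
        · rw [h2]; congr 1; omega
        · -- A scans x first, then y, then t; the picked element's scan skips y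
          rw [rmmScan] at h3 ⊢
          by_cases hx : PySem.List.pyGetD maximum x 0
              = PySem.List.pyGetD maximum
                  (t.foldl (fun b y => if PySem.List.pyGetD maximum b 0 < PySem.List.pyGetD maximum y 0 then y else b) x) 0
          · rw [if_pos hx] at h3 ⊢; exact h3
          · rw [if_neg hx] at h3 ⊢
            rw [rmmScan, if_neg (by intro hy; omega)]
            exact h3

-- PySem.List.max? on a nonempty list is the plain first-extremal pick fold
theorem max?_cons_pick (key : Int → Int) (t : List Int) (x : Int) :
    PySem.List.max? (x :: t) key
      = some (t.foldl (fun b y => if key b < key y then y else b) x) := by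
  induction t generalizing x with
  | nil => simp [PySem.List.max?]
  | cons y t ih =>
      simp only [PySem.List.max?, List.foldl_cons] at ih ⊢
      by_cases h : key x < key y <;> simp [h, ih]

-- ===== VERDICT (by name: the statement is the Claim_ definition above) =====
theorem return_maximal_max_spec : Claim_equal_return_maximal_max := by
  intro fs mx _ hpre
  obtain ⟨hne, -⟩ := hpre
  unfold Spec_return_maximal_max return_maximal_max return_maximal_max_alt
  match fs, hne with
  | x :: t, _ =>
    rw [PySem.List.foldl_append_singleton_eq_map]
    simp only [List.map_cons, List.nil_append]
    rw [PySem.List.max?_id_cons]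
    rw [max?_cons_pick (fun i => PySem.List.pyGetD mx i 0) t x]
    obtain ⟨-, h2, h3⟩ := pick_props mx t x
    rw [Option.getD_some, ← h2, h3]
    rfl
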